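-- pv_equiv track=rewrite | github.com/jalddak/ps_training | python/프로그래머스 고득점 kit 연습/폰켓몬.py | solution
-- ===== SOURCE A (Python) =====
-- def solution(nums):
--     answer = 0
--     length = len(nums)
--     cnt = length//2
--     result = []
--
--     for n in nums:
--         if n not in result:
--             result.append(n)
--             answer += 1
--         if answer == cnt:
--             break
--
--     return answer
-- ===== SOURCE B (Python) =====
-- def solution(nums):
--     s = sorted(nums)
--     distinct = 0
--     prev = None
--     for x in s:
--         if prev is None or x != prev:
--             distinct += 1
--         prev = x
--     return min(distinct, len(nums) // 2)
-- ===== Notes on version B (the rewrite author's own statement) =====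
-- stated objective: alternative
-- what changed: Replaced A's growing-list membership scans with early break by a sort followed by a single adjacent-comparison pass that counts value changes, then caps that distinct count at len(nums)//2.
-- intended difference: On single-element lists A returns 1 (its break check 'answer == cnt' runs only after incrementing, so the cap cnt=0 never fires) while B returns 0 = min(1, 1//2), the intended cap of the distinct count at half the length. — e.g. on solution([7]): A returns 1, B returns 0
import Mathlib
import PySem

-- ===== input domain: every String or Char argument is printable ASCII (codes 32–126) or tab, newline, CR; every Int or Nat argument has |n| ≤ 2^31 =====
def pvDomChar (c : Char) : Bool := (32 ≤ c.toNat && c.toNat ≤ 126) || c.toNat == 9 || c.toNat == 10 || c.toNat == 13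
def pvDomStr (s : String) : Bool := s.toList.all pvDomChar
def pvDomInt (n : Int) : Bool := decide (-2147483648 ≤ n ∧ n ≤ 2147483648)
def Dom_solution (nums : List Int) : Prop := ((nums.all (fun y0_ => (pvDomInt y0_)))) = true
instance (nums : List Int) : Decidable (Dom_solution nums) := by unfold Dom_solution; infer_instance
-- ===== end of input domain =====

-- B replaces A's growing-list membership loop (with early break) by sort + one adjacent-comparison pass counting value changes, capped at len//2; on one-element lists A's break check never fires, so A returns 1 where B returns the intended 0.

-- ===== PORT A =====
-- the for-loop of A: state = (answer, result); break modelled by returning early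
def solutionLoop (cnt : Int) : List Int → Int → List Int → Int
  | [], answer, _ => answer
  | n :: rest, answer, result =>
    if result.contains n then
      -- 'n not in result' false: no append; then the break check
      if answer = cnt then answer else solutionLoop cnt rest answer result
    else
      -- append n, answer += 1; then the break check
      if answer + 1 = cnt then answer + 1
      else solutionLoop cnt rest (answer + 1) (result ++ [n])

def solution (nums : List Int) : Int :=
  let length : Int := nums.length
  let cnt : Int := PySem.Int.floordiv length 2
  solutionLoop cnt nums 0 []

-- ===== PORT B =====
-- one iteration of Source B's loop: state = (distinct, prev)
def solutionAltStep (st : Int × Option Int) (x : Int) : Int × Option Int :=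
  (match st.2 with
    | none => st.1 + 1          -- 'prev is None'
    | some p => if x ≠ p then st.1 + 1 else st.1,
   some x)                      -- 'prev = x'

def solution_alt (nums : List Int) : Int :=
  let s := PySem.List.sorted nums (fun x => x) false
  let st := s.foldl solutionAltStep (0, none)
  min st.1 (PySem.Int.floordiv (nums.length : Int) 2)

-- ===== PRECONDITION & SPEC =====
-- On one-element lists A returns 1 (its break check runs only after incrementing, so the cap cnt=0 never fires) while B returns min(1,0)=0, the intended 'distinct count capped at half the length'.
def D_solution (nums : List Int) : Prop := nums.length = 1
instance (nums : List Int) : Decidable (D_solution nums) := by unfold D_solution; infer_instance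

def Spec_solution (nums : List Int) (out : Int) : Prop := ¬ D_solution nums → out = solution_alt nums
instance (nums : List Int) (out : Int) : Decidable (Spec_solution nums out) := by unfold Spec_solution; infer_instance

def pvDiffWitness_solution : List Int := [7]
def pvDiffWitnessOut_solution : Int × Int := (1, 0)

-- ===== CLAIM (what is proved, stated in full; the proofs are below) =====
def Claim_unchanged_solution : Prop := ∀ (nums : List Int), Dom_solution nums → Spec_solution nums (solution nums)
def Claim_changed_solution : Prop := Dom_solution (pvDiffWitness_solution) ∧ D_solution (pvDiffWitness_solution) ∧ solution (pvDiffWitness_solution) = pvDiffWitnessOut_solution.1 ∧ solution_alt (pvDiffWitness_solution) = pvDiffWitnessOut_solution.2 ∧ pvDiffWitnessOut_solution.1 ≠ pvDiffWitnessOut_solution.2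
def Claim_exact_solution : Prop := ∀ (nums : List Int), Dom_solution nums → D_solution nums → solution nums ≠ solution_alt nums

-- ===== LEMMAS AND PROOFS =====

-- Set.add folding only grows the list
lemma length_le_foldl_add (rest : List Int) : ∀ (result : List Int),
    result.length ≤ (rest.foldl PySem.Set.add result).length := by
  induction rest with
  | nil => intro result; simp
  | cons n rest ih =>
    intro result
    simp only [List.foldl_cons]
    refine le_trans ?_ (ih (PySem.Set.add result n))
    simp only [PySem.Set.add]
    split <;> simp

-- characterisation of A's loop: provided the break value cnt is not already reached
-- at entry (except trivially on an empty rest), the loop returns the total number of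
-- distinct elements, capped at cnt iff cnt is still ahead.
lemma solutionLoop_eq (cnt : Int) : ∀ (rest result : List Int),
    ((result.length : Int) = cnt → rest = []) →
    solutionLoop cnt rest (result.length : Int) result =
      if (result.length : Int) < cnt then
        min ((rest.foldl PySem.Set.add result).length : Int) cnt
      else ((rest.foldl PySem.Set.add result).length : Int) := by
  intro rest
  induction rest with
  | nil =>
    intro result _
    simp only [solutionLoop, List.foldl_nil]
    split_ifs with h
    · omega
    · rfl
  | cons n rest ih =>
    intro result hne
    have hLne : (result.length : Int) ≠ cnt := fun h => by simpa using hne h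
    simp only [solutionLoop, List.foldl_cons]
    by_cases hc : result.contains n
    · -- no append: Set.add result n = result
      have hadd : PySem.Set.add result n = result := by
        simp only [PySem.Set.add, PySem.Set.contains]
        rw [if_pos hc]
      rw [hadd, if_pos hc, if_neg hLne]
      exact ih result (fun h => absurd h hLne)
    · -- append: Set.add result n = result ++ [n]
      have hadd : PySem.Set.add result n = result ++ [n] := by
        simp only [PySem.Set.add, PySem.Set.contains]
        rw [if_neg hc]
      rw [hadd, if_neg hc]
      have hlen : ((result ++ [n]).length : Int) = (result.length : Int) + 1 := by
        simp
      by_cases hb : (result.length : Int) + 1 = cnt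
      · -- break fires: returns cnt; total distinct is ≥ cnt
        rw [if_pos hb]
        have hge : ((result ++ [n]).length : Int) ≤
            ((rest.foldl PySem.Set.add (result ++ [n])).length : Int) := by
          exact_mod_cast length_le_foldl_add rest (result ++ [n])
        rw [if_pos (by omega)]
        omega
      · rw [if_neg hb]
        have := ih (result ++ [n]) (by rw [hlen]; exact fun h => absurd h hb)
        rw [hlen] at this
        rw [this]
        split_ifs with h1 h2 h2 <;> omega

lemma floordiv_two_len (nums : List Int) :
    PySem.Int.floordiv (nums.length : Int) 2 = ((nums.length / 2 : Nat) : Int) := by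
  exact_mod_cast PySem.Int.floordiv_natCast nums.length 2

-- A's distinct-collecting list has the cardinality of the finset of elements
lemma ofList_length_eq_card (nums : List Int) :
    ((PySem.Set.ofList nums).length : Int) = (nums.toFinset.card : Int) := by
  have hnd : (PySem.Set.ofList nums).Nodup := PySem.Set.nodup_ofList nums
  have hfs : (PySem.Set.ofList nums).toFinset = nums.toFinset := by
    ext x; simp [PySem.Set.mem_ofList]
  have := List.toFinset_card_of_nodup hnd
  rw [hfs] at this
  exact_mod_cast this.symm

-- B's adjacent-comparison pass over a ≤-sorted tail, with prev = p a lower bound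
lemma foldl_step_some (s : List Int) : ∀ (_hs : s.Pairwise (· ≤ ·)) (p d : Int),
    (∀ x ∈ s, p ≤ x) →
    (s.foldl solutionAltStep (d, some p)).1 = d + ((s.toFinset.erase p).card : Int) := by
  induction s with
  | nil => intro _ p d _; simp
  | cons a rest ih =>
    intro hs p d hlb
    have hpa : p ≤ a := hlb a (by simp)
    have hrest : rest.Pairwise (· ≤ ·) := hs.of_cons
    have halb : ∀ x ∈ rest, a ≤ x := fun x hx => List.rel_of_pairwise_cons hs hx
    simp only [List.foldl_cons, solutionAltStep]
    by_cases hap : a = p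
    · subst hap
      simp only [ne_eq, not_true_eq_false, if_false]
      rw [ih hrest a d halb]
      have hE : ((a :: rest).toFinset).erase a = rest.toFinset.erase a := by
        ext x
        simp only [List.toFinset_cons, Finset.mem_erase, Finset.mem_insert,
          List.mem_toFinset]
        tauto
      rw [hE]
    · have hpa' : p < a := lt_of_le_of_ne hpa (fun h => hap h.symm)
      simp only [ne_eq, hap, not_false_eq_true, if_true]
      rw [ih hrest a (d + 1) halb]
      have hpnot : p ∉ (a :: rest).toFinset := by
        simp only [List.toFinset_cons, Finset.mem_insert, List.mem_toFinset]
        rintro (h | h)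
        · exact absurd h.symm hap
        · exact absurd (halb p h) (not_le.mpr hpa')
      rw [Finset.erase_eq_of_notMem hpnot]
      have hI : (a :: rest).toFinset = insert a (rest.toFinset.erase a) := by
        ext x
        simp only [List.toFinset_cons, Finset.mem_insert, Finset.mem_erase,
          List.mem_toFinset]
        tauto
      rw [hI, Finset.card_insert_of_notMem (Finset.notMem_erase a _)]
      push_cast
      ring

-- the full pass counts the distinct elements of a sorted list
lemma foldl_step_card (s : List Int) (hs : s.Pairwise (· ≤ ·)) :
    (s.foldl solutionAltStep (0, none)).1 = (s.toFinset.card : Int) := by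
  cases s with
  | nil => simp
  | cons a rest =>
    simp only [List.foldl_cons, solutionAltStep]
    rw [foldl_step_some rest hs.of_cons a (0 + 1)
      (fun x hx => List.rel_of_pairwise_cons hs hx)]
    have hI : (a :: rest).toFinset = insert a (rest.toFinset.erase a) := by
      ext x
      simp only [List.toFinset_cons, Finset.mem_insert, Finset.mem_erase,
        List.mem_toFinset]
      tauto
    rw [hI, Finset.card_insert_of_notMem (Finset.notMem_erase a _)]
    push_cast
    ring

-- B computes min(|toFinset nums|, len nums // 2)
lemma solution_alt_eq (nums : List Int) :
    solution_alt nums = min ((nums.toFinset.card : Int)) ((nums.length / 2 : Nat) : Int) := by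
  have hs := PySem.List.sorted_pairwise nums (fun x => x) (κ := Int)
  have hE : (PySem.List.sorted nums (fun x => x) false).toFinset = nums.toFinset := by
    ext x; simp [PySem.List.mem_sorted]
  unfold solution_alt
  show min (((PySem.List.sorted nums (fun x => x) false).foldl solutionAltStep
      (0, none)).1) (PySem.Int.floordiv (nums.length : Int) 2) =
    min ((nums.toFinset.card : Int)) ((nums.length / 2 : Nat) : Int)
  rw [floordiv_two_len, foldl_step_card _ hs, hE]

lemma solution_eq_min (nums : List Int) (h : nums.length ≠ 1) :
    solution nums = solution_alt nums := by
  unfold solution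
  rw [solution_alt_eq]
  simp only []
  rw [floordiv_two_len]
  have hmain := solutionLoop_eq ((nums.length / 2 : Nat) : Int) nums []
  simp only [List.length_nil, Nat.cast_zero] at hmain
  have hofl : PySem.Set.ofList nums = nums.foldl PySem.Set.add [] :=
    PySem.Set.ofList_eq_foldl nums
  rcases Nat.eq_zero_or_pos nums.length with hn | hn
  · -- empty list
    have : nums = [] := List.eq_nil_of_length_eq_zero hn
    subst this
    simp [solutionLoop]
  · -- nums.length ≥ 2
    have h2 : 2 ≤ nums.length := by omega
    have hcnt : (1 : Int) ≤ ((nums.length / 2 : Nat) : Int) := by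
      have : 1 ≤ nums.length / 2 := by omega
      exact_mod_cast this
    rw [hmain (by intro hc; omega)]
    rw [if_pos (by omega), ← hofl, ofList_length_eq_card]

-- ===== VERDICT (by name: the statement is the Claim_ definition above) =====
theorem solution_spec : Claim_unchanged_solution := by
  intro nums _ hD
  exact solution_eq_min nums hD

theorem solution_changed : Claim_changed_solution := by
  unfold Claim_changed_solution; decide

theorem solution_tight : Claim_exact_solution := by
  intro nums _ hD
  unfold D_solution at hD
  match nums, hD with
  | [n], _ =>
    simp [solution, solution_alt, solutionLoop, solutionAltStep,
      PySem.List.sorted, PySem.List.insertBy, PySem.Int.floordiv]
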